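-- pv_equiv track=rewrite | github.com/virenderox/LeetCode-Problem | Hashmap/count Equal 0,1and 2/equal.py | getSubstringWithEqual012
-- ===== SOURCE A (Python) =====
-- def getSubstringWithEqual012(num):
--
--     ans = 0
--
--     memo = {}
--
--     countZeros = countOnes= countTwos = 0
--
--     key = str(countOnes - countZeros) + '#' + str(countTwos - countOnes)
--
--     memo[key] = 1
--
--     lenS = len(num)
--     for i in range(lenS):
--
--         if num[i] == '0':
--             countZeros += 1
--
--         elif num[i] == '1':
--             countOnes += 1
--
--         else:
--             countTwos += 1
--
--         currentKey = str(countOnes - countZeros) + '#' + str(countTwos - countOnes)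
--
--         if currentKey in memo:
--             ans += memo[currentKey]
--             memo[currentKey] += 1
--
--         else:
--             memo[currentKey] = 1
--
--
--     return ans
-- ===== SOURCE B (Python) =====
-- def getSubstringWithEqual012(num):
--     # Phase 1: list of prefix-balance states (ones-zeros, twos-ones), empty prefix included.
--     states = [(0, 0)]
--     d10 = 0
--     d21 = 0
--     for ch in num:
--         if ch == '0':
--             d10 -= 1
--         elif ch == '1':
--             d10 += 1
--             d21 -= 1
--         else:
--             d21 += 1
--         states.append((d10, d21))
--     # Phase 2: sort so equal states become adjacent, then count pairs run by run.
--     states.sort()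
--     ans = 0
--     run = 0
--     prev = None
--     for s in states:
--         if s == prev:
--             run += 1
--         else:
--             run = 0
--         ans += run
--         prev = s
--     return ans
-- ===== Notes on version B (the rewrite author's own statement) =====
-- stated objective: alternative
-- what changed: B drops the hashmap entirely: it materializes the whole list of prefix-balance states (ones-zeros, twos-ones), sorts that list so equal states become adjacent, and counts the balanced substrings with a run-length pass over the sorted list, instead of A's single pass that accumulates ans from a string-keyed memo dict while building it.
import Mathlib
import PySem

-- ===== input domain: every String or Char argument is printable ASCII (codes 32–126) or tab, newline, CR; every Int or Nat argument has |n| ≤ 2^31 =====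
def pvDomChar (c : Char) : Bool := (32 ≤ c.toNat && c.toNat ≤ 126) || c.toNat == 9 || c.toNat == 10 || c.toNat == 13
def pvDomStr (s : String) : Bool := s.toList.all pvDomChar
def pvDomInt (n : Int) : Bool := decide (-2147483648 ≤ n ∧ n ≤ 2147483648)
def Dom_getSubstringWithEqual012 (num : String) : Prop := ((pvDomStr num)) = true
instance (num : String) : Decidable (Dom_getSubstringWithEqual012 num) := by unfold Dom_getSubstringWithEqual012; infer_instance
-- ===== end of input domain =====

-- B replaces A's in-loop string-keyed hashmap accumulation by a hashmap-free scheme: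
-- collect all prefix-balance states in a list, sort it, and count equal-state pairs
-- with a run-length scan over the sorted list (different algorithm, O(n log n); measured faster by a constant factor: no per-character string-key building/hashing).


-- ===== PORT A =====
-- loop body of A ('for i in range(lenS)' reads num[i] for each i in order = each char of num);
-- state is (ans, memo, countZeros, countOnes, countTwos)
def pvStepA (st : Int × PySem.Dict String Int × Int × Int × Int) (c : Char) :
    Int × PySem.Dict String Int × Int × Int × Int :=
  match st with
  | (ans, memo, countZeros, countOnes, countTwos) =>
    let (countZeros, countOnes, countTwos) :=
      if c == '0' then (countZeros + 1, countOnes, countTwos)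
      else if c == '1' then (countZeros, countOnes + 1, countTwos)
      else (countZeros, countOnes, countTwos + 1)
    let currentKey := PySem.Int.toStr (countOnes - countZeros) ++ "#" ++ PySem.Int.toStr (countTwos - countOnes)
    -- 'if currentKey in memo: ans += memo[currentKey]; memo[currentKey] += 1 else: memo[currentKey] = 1'
    match memo.get? currentKey with
    | some v => (ans + v, memo.insert currentKey (v + 1), countZeros, countOnes, countTwos)
    | none   => (ans, memo.insert currentKey 1, countZeros, countOnes, countTwos)

def getSubstringWithEqual012 (num : String) : Int :=
  let key : String := PySem.Int.toStr (0 - 0) ++ "#" ++ PySem.Int.toStr (0 - 0)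
  let init : Int × PySem.Dict String Int × Int × Int × Int :=
    (0, PySem.Dict.empty.insert key 1, 0, 0, 0)
  (num.toList.foldl pvStepA init).1

-- ===== PORT B =====
-- phase-1 loop body of B ('states.append((d10, d21))'); state is (states, d10, d21)
def pvStep1B (st : List (Int × Int) × Int × Int) (c : Char) : List (Int × Int) × Int × Int :=
  match st with
  | (states, d10, d21) =>
    let (d10, d21) :=
      if c == '0' then (d10 - 1, d21)
      else if c == '1' then (d10 + 1, d21 - 1)
      else (d10, d21 + 1)
    (states ++ [(d10, d21)], d10, d21)

-- phase-2 loop body of B; state is (ans, run, prev);  'if s == prev: run += 1 else: run = 0'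
def pvStep2B (t : Int × Int × Option (Int × Int)) (s : Int × Int) : Int × Int × Option (Int × Int) :=
  let run := if t.2.2 == some s then t.2.1 + 1 else 0
  (t.1 + run, run, some s)

def getSubstringWithEqual012_alt (num : String) : Int :=
  let states := (num.toList.foldl pvStep1B ([((0 : Int), (0 : Int))], (0 : Int), (0 : Int))).1
  let sortedStates := PySem.List.sorted2 states Prod.fst Prod.snd   -- states.sort(): tuple = lexicographic
  (sortedStates.foldl pvStep2B (0, 0, none)).1

-- ===== PRECONDITION & SPEC =====
def Spec_getSubstringWithEqual012 (num : String) (out : Int) : Prop := out = getSubstringWithEqual012_alt num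
instance (num : String) (out : Int) : Decidable (Spec_getSubstringWithEqual012 num out) := by unfold Spec_getSubstringWithEqual012; infer_instance

-- ===== CLAIM (what is proved, stated in full; the proofs are below) =====
def Claim_equal_getSubstringWithEqual012 : Prop := ∀ (num : String), Dom_getSubstringWithEqual012 num → Spec_getSubstringWithEqual012 num (getSubstringWithEqual012 num)

-- ===== LEMMAS AND PROOFS =====

-- decimal decoding, to prove that Nat.toDigits 10 is injective
def pvDec (cs : List Char) : Nat := cs.foldl (fun a c => 10 * a + (c.toNat - 48)) 0

theorem pvDec_append (xs : List Char) (c : Char) :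
    pvDec (xs ++ [c]) = 10 * pvDec xs + (c.toNat - 48) := by
  simp [pvDec, List.foldl_append]

theorem pvDec_toDigits : ∀ n : Nat, pvDec (Nat.toDigits 10 n) = n := by
  intro n
  induction n using Nat.strong_induction_on with
  | _ n ih =>
    rw [Nat.toDigits_eq_if (by norm_num)]
    split
    · rename_i h
      interval_cases n <;> decide
    · rename_i h
      rw [pvDec_append, ih (n / 10) (by omega)]
      have hm : n % 10 < 10 := Nat.mod_lt _ (by norm_num)
      have hd : (n % 10).digitChar.toNat - 48 = n % 10 := by
        set m := n % 10 with hmm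
        interval_cases m <;> decide
      omega

theorem pvToDigits10_inj {m n : Nat} (h : Nat.toDigits 10 m = Nat.toDigits 10 n) : m = n := by
  have := congrArg pvDec h
  simpa [pvDec_toDigits] using this

theorem pvHash_not_mem_toDigits (n : Nat) : '#' ∉ Nat.toDigits 10 n := by
  intro h
  have := Nat.isDigit_of_mem_toDigits (by norm_num) (by norm_num) h
  simp [Char.isDigit] at this

theorem pvDash_not_mem_toDigits (n : Nat) : '-' ∉ Nat.toDigits 10 n := by
  intro h
  have := Nat.isDigit_of_mem_toDigits (by norm_num) (by norm_num) h
  simp [Char.isDigit] at this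

theorem pvHash_not_mem_toChars (n : Int) : '#' ∉ PySem.Int.toChars n := by
  unfold PySem.Int.toChars
  split
  · intro h
    rcases List.mem_cons.mp h with h | h
    · exact absurd h (by decide)
    · exact pvHash_not_mem_toDigits _ h
  · exact pvHash_not_mem_toDigits _

theorem pvToChars_inj {a b : Int} (h : PySem.Int.toChars a = PySem.Int.toChars b) : a = b := by
  unfold PySem.Int.toChars at h
  split_ifs at h with h1 h2 h2
  · have := pvToDigits10_inj (List.cons.inj h).2
    omega
  · exact absurd (h ▸ List.mem_cons_self) (pvDash_not_mem_toDigits _)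
  · exact absurd (h ▸ List.mem_cons_self) (pvDash_not_mem_toDigits _)
  · have := pvToDigits10_inj h
    omega

theorem pvSplitSep {α : Type} : ∀ (xs xs' : List α) {ys ys' : List α} {sep : α},
    sep ∉ xs → sep ∉ xs' → xs ++ sep :: ys = xs' ++ sep :: ys' → xs = xs' ∧ ys = ys' := by
  intro xs
  induction xs with
  | nil =>
    intro xs' ys ys' sep h1 h2 h
    cases xs' with
    | nil => simpa using h
    | cons a t =>
      simp only [List.nil_append, List.cons_append, List.cons.injEq] at h
      exact absurd (h.1 ▸ List.mem_cons_self) h2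
  | cons a t ih =>
    intro xs' ys ys' sep h1 h2 h
    cases xs' with
    | nil =>
      simp only [List.nil_append, List.cons_append, List.cons.injEq] at h
      exact absurd (h.1 ▸ List.mem_cons_self) h1
    | cons b t' =>
      simp only [List.cons_append, List.cons.injEq] at h
      obtain ⟨hab, hrest⟩ := h
      obtain ⟨ht, hy⟩ := ih t' (fun hm => h1 (List.mem_cons_of_mem _ hm))
        (fun hm => h2 (List.mem_cons_of_mem _ hm)) hrest
      exact ⟨by rw [hab, ht], hy⟩

-- the string key A builds from a state
def pvEnc (s : Int × Int) : String := PySem.Int.toStr s.1 ++ "#" ++ PySem.Int.toStr s.2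

theorem pvEnc_toList (s : Int × Int) :
    (pvEnc s).toList = PySem.Int.toChars s.1 ++ '#' :: PySem.Int.toChars s.2 := by
  simp [pvEnc, String.toList_append, PySem.Int.toList_toStr]

theorem pvEnc_inj {s t : Int × Int} (h : pvEnc s = pvEnc t) : s = t := by
  have h' := congrArg String.toList h
  rw [pvEnc_toList, pvEnc_toList] at h'
  obtain ⟨h1, h2⟩ := pvSplitSep _ _ (pvHash_not_mem_toChars _) (pvHash_not_mem_toChars _) h'
  exact Prod.ext (pvToChars_inj h1) (pvToChars_inj h2)

-- ghost state transition / prefix-state list shared by the proofs of both sides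
def pvStep (s : Int × Int) (c : Char) : Int × Int :=
  if c == '0' then (s.1 - 1, s.2)
  else if c == '1' then (s.1 + 1, s.2 - 1)
  else (s.1, s.2 + 1)

def pvScan (s : Int × Int) : List Char → List (Int × Int)
  | [] => []
  | c :: t => pvStep s c :: pvScan (pvStep s c) t

-- total number of equal pairs (i < j) in a list
def pvPairs : List (Int × Int) → Int
  | [] => 0
  | a :: t => (t.count a : Int) + pvPairs t

theorem pvPairs_append (S : List (Int × Int)) (s : Int × Int) :
    pvPairs (S ++ [s]) = pvPairs S + (S.count s : Int) := by
  induction S with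
  | nil => simp [pvPairs]
  | cons a t ih =>
    simp only [List.cons_append, pvPairs, ih, List.count_append, List.count_cons,
      List.count_nil]
    have : (s == a) = (a == s) := by
      by_cases h : a = s
      · simp [h]
      · simp [h, Ne.symm h]
    rw [this]
    push_cast
    ring

theorem pvPairs_perm {S T : List (Int × Int)} (h : S.Perm T) : pvPairs S = pvPairs T := by
  induction h with
  | nil => rfl
  | cons a p ih => simp only [pvPairs, p.count_eq, ih]
  | swap a b t =>
    simp only [pvPairs, List.count_cons]
    have : (b == a) = (a == b) := by
      by_cases h : a = b
      · simp [h]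
      · simp [h, Ne.symm h]
    rw [this]
    push_cast
    ring
  | trans _ _ ih1 ih2 => exact ih1.trans ih2

-- Python's lexicographic tuple order
def pvLe (a b : Int × Int) : Prop := a.1 < b.1 ∨ (a.1 = b.1 ∧ a.2 ≤ b.2)

-- the comparator sorted2 uses with keys Prod.fst / Prod.snd
def pvBf (a b : Int × Int) : Bool :=
  decide (a.1 < b.1) || (!decide (b.1 < a.1) && decide (a.2 < b.2))

theorem pvBf_true {a b : Int × Int} (h : pvBf a b = true) : pvLe a b := by
  unfold pvBf at h
  unfold pvLe
  simp only [Bool.or_eq_true, Bool.and_eq_true, Bool.not_eq_true', decide_eq_true_eq,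
    decide_eq_false_iff_not] at h
  omega

theorem pvBf_false {a b : Int × Int} (h : pvBf a b = false) : pvLe b a := by
  unfold pvBf at h
  unfold pvLe
  by_cases h1 : a.1 < b.1
  · simp [h1] at h
  · by_cases h2 : b.1 < a.1
    · omega
    · by_cases h3 : a.2 < b.2
      · simp [h1, h2, h3] at h
      · omega

theorem pvLe_trans {a b c : Int × Int} (h1 : pvLe a b) (h2 : pvLe b c) : pvLe a c := by
  unfold pvLe at *
  omega

theorem pvLe_antisymm {a b : Int × Int} (h1 : pvLe a b) (h2 : pvLe b a) : a = b := by
  unfold pvLe at *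
  have : a.1 = b.1 ∧ a.2 = b.2 := by omega
  exact Prod.ext this.1 this.2

theorem pvInsertBy_pairwise (x : Int × Int) :
    ∀ (l : List (Int × Int)), l.Pairwise pvLe →
      (PySem.List.insertBy pvBf x l).Pairwise pvLe := by
  intro l
  induction l with
  | nil => intro _; simp [PySem.List.insertBy]
  | cons y ys ih =>
    intro hp
    rw [List.pairwise_cons] at hp
    show (if pvBf x y = true then x :: y :: ys else y :: PySem.List.insertBy pvBf x ys).Pairwise pvLe
    split
    · rename_i hb
      refine List.pairwise_cons.mpr ⟨?_, List.pairwise_cons.mpr hp⟩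
      intro z hz
      rcases List.mem_cons.mp hz with rfl | hz
      · exact pvBf_true hb
      · exact pvLe_trans (pvBf_true hb) (hp.1 z hz)
    · rename_i hb
      refine List.pairwise_cons.mpr ⟨?_, ih hp.2⟩
      intro z hz
      rcases (PySem.List.mem_insertBy pvBf x z ys).mp hz with rfl | hz
      · exact pvBf_false (Bool.eq_false_iff.mpr hb)
      · exact hp.1 z hz

theorem pvFoldl_insertBy_pairwise (xs : List (Int × Int)) :
    ∀ acc : List (Int × Int), acc.Pairwise pvLe →
      (xs.foldl (fun acc x => PySem.List.insertBy pvBf x acc) acc).Pairwise pvLe := by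
  induction xs with
  | nil => intro acc h; exact h
  | cons x t ih => intro acc h; exact ih _ (pvInsertBy_pairwise x acc h)

theorem pvSorted2_eq (xs : List (Int × Int)) :
    PySem.List.sorted2 xs Prod.fst Prod.snd
      = xs.foldl (fun acc x => PySem.List.insertBy pvBf x acc) [] := rfl

theorem pvSorted2_pairwise (xs : List (Int × Int)) :
    (PySem.List.sorted2 xs Prod.fst Prod.snd).Pairwise pvLe := by
  rw [pvSorted2_eq]
  exact pvFoldl_insertBy_pairwise xs [] (by simp)

-- phase 1 of B builds exactly the prefix-state list
theorem pvPhase1 : ∀ (l : List Char) (st : List (Int × Int)) (a b : Int),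
    (l.foldl pvStep1B (st, a, b)).1 = st ++ pvScan (a, b) l := by
  intro l
  induction l with
  | nil => intro st a b; simp [pvScan]
  | cons c t ih =>
    intro st a b
    show (t.foldl pvStep1B (pvStep1B (st, a, b) c)).1 = _
    have hstep : pvStep1B (st, a, b) c = (st ++ [pvStep (a, b) c], (pvStep (a, b) c).1, (pvStep (a, b) c).2) := by
      unfold pvStep1B pvStep
      by_cases c0 : c = '0'
      · simp [c0]
      · by_cases c1 : c = '1'
        · simp [c1]
        · simp [c0, c1]
    rw [hstep, ih]
    simp [pvScan]

-- phase 2 of B: the run-length scan counts the pairs of a sorted list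
theorem pvRunFold : ∀ (l : List (Int × Int)) (x : Int × Int) (ans run : Int),
    (x :: l).Pairwise pvLe →
    (l.foldl pvStep2B (ans, run, some x)).1 = ans + (run + 1) * (l.count x : Int) + pvPairs l := by
  intro l
  induction l with
  | nil => intro x ans run _; simp [pvPairs]
  | cons s t ih =>
    intro x ans run hp
    rw [List.pairwise_cons] at hp
    have hxs : pvLe x s := hp.1 s List.mem_cons_self
    have hpt : (s :: t).Pairwise pvLe := hp.2
    show (t.foldl pvStep2B (pvStep2B (ans, run, some x) s)).1 = _
    by_cases hx : x = s
    · subst hx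
      have hstep : pvStep2B (ans, run, some x) x = (ans + (run + 1), run + 1, some x) := by
        simp [pvStep2B]
      rw [hstep, ih x _ _ hpt]
      simp only [pvPairs, List.count_cons_self]
      push_cast
      ring
    · have hstep : pvStep2B (ans, run, some x) s = (ans + 0, 0, some s) := by
        have : (some x == some s) = false := by simp [hx]
        simp [pvStep2B, this]
      rw [hstep, ih s _ _ hpt]
      have hxt : x ∉ t := by
        intro hm
        have h1 := List.pairwise_cons.mp hpt
        exact hx (pvLe_antisymm hxs (h1.1 x hm))
      have hcount : ((s :: t).count x : Int) = 0 := by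
        simp [List.count_eq_zero_of_not_mem hxt, Ne.symm hx]
      simp only [pvPairs, hcount]
      push_cast
      ring

-- B equals the pair count of the prefix-state list
theorem pvSortCount (states : List (Int × Int)) (hne : states ≠ []) :
    ((PySem.List.sorted2 states Prod.fst Prod.snd).foldl pvStep2B (0, 0, none)).1
      = pvPairs states := by
  have hperm : (PySem.List.sorted2 states Prod.fst Prod.snd).Perm states :=
    PySem.List.sorted2_perm states Prod.fst Prod.snd false
  have hpw := pvSorted2_pairwise states
  have hpairs : pvPairs (PySem.List.sorted2 states Prod.fst Prod.snd) = pvPairs states :=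
    pvPairs_perm hperm
  cases hs : PySem.List.sorted2 states Prod.fst Prod.snd with
  | nil =>
    exact absurd (hs ▸ hperm).symm.eq_nil hne
  | cons x l =>
    rw [hs] at hpw hpairs
    show (l.foldl pvStep2B (pvStep2B (0, 0, none) x)).1 = _
    have hstep : pvStep2B ((0 : Int), (0 : Int), (none : Option (Int × Int))) x = (0, 0, some x) := by
      simp [pvStep2B]
    rw [hstep, pvRunFold l x 0 0 hpw, ← hpairs]
    simp only [pvPairs]
    push_cast
    ring

theorem pvAltEq (num : String) :
    getSubstringWithEqual012_alt num = pvPairs ((0, 0) :: pvScan (0, 0) num.toList) := by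
  show ((PySem.List.sorted2 ((num.toList.foldl pvStep1B
      ([((0 : Int), (0 : Int))], (0 : Int), (0 : Int))).1) Prod.fst Prod.snd).foldl
      pvStep2B (0, 0, none)).1 = _
  rw [pvPhase1, pvSortCount _ (by simp)]
  rfl

-- A-side loop invariant
def pvInvA (S : List (Int × Int)) (s : Int × Int)
    (a : Int × PySem.Dict String Int × Int × Int × Int) : Prop :=
  (a.2.2.2.1 - a.2.2.1, a.2.2.2.2 - a.2.2.2.1) = s ∧
  (∀ k : Int × Int, a.2.1.get? (pvEnc k)
      = if S.count k = 0 then none else some ((S.count k : Int))) ∧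
  a.1 = pvPairs S

theorem pvInvA_update (ans : Int) (memo : PySem.Dict String Int) (cz co ct : Int)
    (S : List (Int × Int)) (s' : Int × Int) (hs : (co - cz, ct - co) = s')
    (hmemo : ∀ k : Int × Int, memo.get? (pvEnc k)
        = if S.count k = 0 then none else some ((S.count k : Int)))
    (hans : ans = pvPairs S) :
    pvInvA (S ++ [s']) s'
      (match memo.get? (PySem.Int.toStr (co - cz) ++ "#" ++ PySem.Int.toStr (ct - co)) with
       | some v => (ans + v, memo.insert (PySem.Int.toStr (co - cz) ++ "#" ++ PySem.Int.toStr (ct - co)) (v + 1), cz, co, ct)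
       | none   => (ans, memo.insert (PySem.Int.toStr (co - cz) ++ "#" ++ PySem.Int.toStr (ct - co)) 1, cz, co, ct)) := by
  have h1 : co - cz = s'.1 := by rw [← hs]
  have h2 : ct - co = s'.2 := by rw [← hs]
  rw [h1, h2]
  have hkey : PySem.Int.toStr s'.1 ++ "#" ++ PySem.Int.toStr s'.2 = pvEnc s' := rfl
  rw [hkey]
  have hcount : ∀ k : Int × Int, (S ++ [s']).count k
      = S.count k + (if k = s' then 1 else 0) := by
    intro k
    by_cases hk : k = s'
    · simp [hk, List.count_append]
    · simp [List.count_append, hk, Ne.symm hk]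
  have hget := hmemo s'
  cases hc : S.count s' with
  | zero =>
    rw [hc] at hget
    simp only [reduceIte] at hget
    rw [hget]
    refine ⟨hs, ?_, ?_⟩
    · intro k
      show (memo.insert (pvEnc s') 1).get? (pvEnc k)
          = if (S ++ [s']).count k = 0 then none else some (((S ++ [s']).count k : Int))
      rw [hcount k]
      by_cases hk : k = s'
      · subst hk
        rw [PySem.Dict.get?_insert_self, hc]
        simp
      · have hne : pvEnc k ≠ pvEnc s' := fun h => hk (pvEnc_inj h)
        rw [PySem.Dict.get?_insert_of_ne _ _ hne, hmemo k, if_neg hk]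
        simp
    · show ans = pvPairs (S ++ [s'])
      rw [pvPairs_append, hans, hc]
      simp
  | succ n =>
    rw [hc] at hget
    simp only [Nat.succ_ne_zero, if_false] at hget
    rw [hget]
    refine ⟨hs, ?_, ?_⟩
    · intro k
      show (memo.insert (pvEnc s') (((n + 1 : Nat) : Int) + 1)).get? (pvEnc k)
          = if (S ++ [s']).count k = 0 then none else some (((S ++ [s']).count k : Int))
      rw [hcount k]
      by_cases hk : k = s'
      · subst hk
        rw [PySem.Dict.get?_insert_self, hc]
        simp only [Nat.succ_ne_zero, if_false, reduceIte]
        refine (Option.some.injEq _ _).symm ▸ ?_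
        norm_num
      · have hne : pvEnc k ≠ pvEnc s' := fun h => hk (pvEnc_inj h)
        rw [PySem.Dict.get?_insert_of_ne _ _ hne, hmemo k, if_neg hk]
        simp
    · show ans + ((n + 1 : Nat) : Int) = pvPairs (S ++ [s'])
      rw [pvPairs_append, hans, hc]

theorem pvInvA_step (S : List (Int × Int)) (s : Int × Int)
    (a : Int × PySem.Dict String Int × Int × Int × Int) (c : Char)
    (h : pvInvA S s a) : pvInvA (S ++ [pvStep s c]) (pvStep s c) (pvStepA a c) := by
  obtain ⟨ans, memo, cz, co, ct⟩ := a
  obtain ⟨hst, hmemo, hans⟩ := h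
  simp only at hst hmemo hans
  have hs1 : co - cz = s.1 := congrArg Prod.fst hst
  have hs2 : ct - co = s.2 := congrArg Prod.snd hst
  unfold pvStepA pvStep
  by_cases c0 : c = '0'
  · simp only [c0, beq_self_eq_true, if_true]
    exact pvInvA_update ans memo (cz + 1) co ct S (s.1 - 1, s.2)
      (by rw [Prod.mk.injEq]; exact ⟨by omega, by omega⟩) hmemo hans
  · by_cases c1 : c = '1'
    · simp only [c1, if_neg (show ¬ (('1' : Char) == '0') = true by decide), beq_self_eq_true, if_true]
      exact pvInvA_update ans memo cz (co + 1) ct S (s.1 + 1, s.2 - 1)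
        (by rw [Prod.mk.injEq]; exact ⟨by omega, by omega⟩) hmemo hans
    · simp only [if_neg (by simp [c0] : ¬ (c == '0') = true),
        if_neg (by simp [c1] : ¬ (c == '1') = true)]
      exact pvInvA_update ans memo cz co (ct + 1) S (s.1, s.2 + 1)
        (by rw [Prod.mk.injEq]; exact ⟨by omega, by omega⟩) hmemo hans

theorem pvInvA_foldl : ∀ (l : List Char) (S : List (Int × Int)) (s : Int × Int)
    (a : Int × PySem.Dict String Int × Int × Int × Int),
    pvInvA S s a → pvInvA (S ++ pvScan s l) (l.foldl pvStep s) (l.foldl pvStepA a) := by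
  intro l
  induction l with
  | nil => intro S s a h; simpa [pvScan]
  | cons c t ih =>
    intro S s a h
    have := ih (S ++ [pvStep s c]) (pvStep s c) (pvStepA a c) (pvInvA_step S s a c h)
    simpa [pvScan, List.append_assoc] using this

-- ===== VERDICT (by name: the statement is the Claim_ definition above) =====
theorem getSubstringWithEqual012_spec : Claim_equal_getSubstringWithEqual012 := by
  unfold Claim_equal_getSubstringWithEqual012
  intro num _
  unfold Spec_getSubstringWithEqual012
  rw [pvAltEq]
  unfold getSubstringWithEqual012
  have h0 : pvInvA [((0 : Int), (0 : Int))] ((0 : Int), (0 : Int))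
      (0, PySem.Dict.empty.insert (PySem.Int.toStr (0 - 0) ++ "#" ++ PySem.Int.toStr (0 - 0)) 1, 0, 0, 0) := by
    refine ⟨by decide, ?_, by decide⟩
    intro k
    by_cases hk : k = ((0 : Int), (0 : Int))
    · subst hk
      rw [show (PySem.Int.toStr (0 - 0) ++ "#" ++ PySem.Int.toStr (0 - 0)) = pvEnc ((0 : Int), (0 : Int)) from rfl]
      rw [PySem.Dict.get?_insert_self]
      decide
    · have hne : pvEnc k ≠ pvEnc ((0 : Int), (0 : Int)) := fun h => hk (pvEnc_inj h)
      rw [show (PySem.Int.toStr (0 - 0) ++ "#" ++ PySem.Int.toStr (0 - 0)) = pvEnc ((0 : Int), (0 : Int)) from rfl]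
      rw [PySem.Dict.get?_insert_of_ne _ _ hne]
      simp [Ne.symm hk, PySem.Dict.get?_empty]
  have := pvInvA_foldl num.toList [((0 : Int), (0 : Int))] ((0 : Int), (0 : Int)) _ h0
  exact this.2.2
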